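-- pv_equiv track=rewrite | github.com/jlu00/databaseball | data collection/games.py | find_teams
-- ===== SOURCE A (Python) =====
-- def find_teams(val, myteamlist):
--     '''
--     Finds all matches for team abbr in the myteamlist, loops through and at each index, gets the dates,
--     determines if the game date is in the range, returns the team name if it does
--     '''
--
--     t1id = val[1]
--     t2id = val[2]
--     gdate = val[0]
--     team1name = None
--     matches = [x for x in myteamlist if x[0] == t1id]
--     for match in matches:
--         m_startdate = match[2]
--         m_enddate = match[3]
--         if m_enddate != "":
--             if m_startdate <= gdate <= m_enddate:
--                 team1name = match[1]
--         elif gdate >= m_startdate: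
--             team1name = match[1]
--     team2name = None
--     matches = [x for x in myteamlist if x[0] == t2id]
--     for match in matches:
--         m_startdate = match[2]
--         m_enddate = match[3]
--         if m_enddate != "":
--             if m_startdate <= gdate <= m_enddate:
--                 team2name = match[1]
--         elif gdate >= m_startdate:
--             team2name = match[1]
--     return team1name, team2name
-- ===== SOURCE B (Python) =====
-- def find_teams(val, myteamlist):
--     gdate, t1id, t2id = val
--
--     def active(start, end):
--         return (start <= gdate <= end) if end != "" else gdate >= start
--
--     team1name = None
--     team2name = None
--     for tid, name, start, end in myteamlist:
--         if active(start, end):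
--             if tid == t1id:
--                 team1name = name
--             if tid == t2id:
--                 team2name = name
--     return team1name, team2name
-- ===== Notes on version B (the rewrite author's own statement) =====
-- stated objective: simpler
-- what changed: One pass over myteamlist with the date test hoisted into a helper predicate and both team names updated together, instead of two filter-comprehensions each followed by its own loop re-doing the nested if/elif date logic.
import Mathlib
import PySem

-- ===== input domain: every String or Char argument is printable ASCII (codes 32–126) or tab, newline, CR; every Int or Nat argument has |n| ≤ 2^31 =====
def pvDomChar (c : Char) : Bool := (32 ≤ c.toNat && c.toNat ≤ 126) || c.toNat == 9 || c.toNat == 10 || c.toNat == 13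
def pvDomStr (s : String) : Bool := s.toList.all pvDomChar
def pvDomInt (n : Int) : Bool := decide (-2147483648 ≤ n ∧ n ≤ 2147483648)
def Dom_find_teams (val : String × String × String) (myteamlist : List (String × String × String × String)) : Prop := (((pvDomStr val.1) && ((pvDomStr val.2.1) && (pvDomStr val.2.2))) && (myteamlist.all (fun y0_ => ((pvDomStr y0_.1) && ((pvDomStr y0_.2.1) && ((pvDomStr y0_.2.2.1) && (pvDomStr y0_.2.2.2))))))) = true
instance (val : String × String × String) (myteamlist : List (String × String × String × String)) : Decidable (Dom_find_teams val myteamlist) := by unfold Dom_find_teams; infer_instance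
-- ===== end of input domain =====

-- B replaces A's two filter-comprehensions and twin loops by one pass that hoists the
-- date test into a predicate and updates both team names together (objective: simpler).


-- ===== PORT A =====
def find_teams (val : String × String × String) (myteamlist : List (String × String × String × String)) : Option String × Option String :=
  let t1id := val.2.1
  let t2id := val.2.2
  let gdate := val.1
  let team1name : Option String := none
  let matches_ := myteamlist.filter (fun x => x.1 == t1id)
  let team1name := matches_.foldl (fun team1name m =>
    let m_startdate := m.2.2.1
    let m_enddate := m.2.2.2
    if m_enddate ≠ "" then
      (if m_startdate ≤ gdate ∧ gdate ≤ m_enddate then some m.2.1 else team1name)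
    else if gdate ≥ m_startdate then some m.2.1 else team1name) team1name
  let team2name : Option String := none
  let matches_ := myteamlist.filter (fun x => x.1 == t2id)
  let team2name := matches_.foldl (fun team2name m =>
    let m_startdate := m.2.2.1
    let m_enddate := m.2.2.2
    if m_enddate ≠ "" then
      (if m_startdate ≤ gdate ∧ gdate ≤ m_enddate then some m.2.1 else team2name)
    else if gdate ≥ m_startdate then some m.2.1 else team2name) team2name
  (team1name, team2name)

-- ===== PORT B =====
-- B's helper predicate 'active(start, end)' (closes over gdate in Python)
def pvActive (gdate start e : String) : Bool :=
  if e ≠ "" then decide (start ≤ gdate) && decide (gdate ≤ e) else decide (gdate ≥ start)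

def find_teams_alt (val : String × String × String) (myteamlist : List (String × String × String × String)) : Option String × Option String :=
  let gdate := val.1
  let t1id := val.2.1
  let t2id := val.2.2
  myteamlist.foldl (fun (acc : Option String × Option String) m =>
    if pvActive gdate m.2.2.1 m.2.2.2 then
      (if m.1 == t1id then some m.2.1 else acc.1,
       if m.1 == t2id then some m.2.1 else acc.2)
    else acc) (none, none)

-- ===== PRECONDITION & SPEC =====
def Spec_find_teams (val : String × String × String) (myteamlist : List (String × String × String × String)) (out : Option String × Option String) : Prop := out = find_teams_alt val myteamlist
instance (val : String × String × String) (myteamlist : List (String × String × String × String)) (out : Option String × Option String) : Decidable (Spec_find_teams val myteamlist out) := by unfold Spec_find_teams; infer_instance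

-- ===== CLAIM (what is proved, stated in full; the proofs are below) =====
def Claim_equal_find_teams : Prop := ∀ (val : String × String × String) (myteamlist : List (String × String × String × String)), Dom_find_teams val myteamlist → Spec_find_teams val myteamlist (find_teams val myteamlist)

-- ===== LEMMAS AND PROOFS =====

-- A's loop body, abstracted for the proof
def pvStepA (gdate : String) (acc : Option String) (m : String × String × String × String) : Option String :=
  if m.2.2.2 ≠ "" then
    (if m.2.2.1 ≤ gdate ∧ gdate ≤ m.2.2.2 then some m.2.1 else acc)
  else if gdate ≥ m.2.2.1 then some m.2.1 else acc

-- B's loop body, abstracted for the proof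
def pvStepB (gdate t1id t2id : String) (acc : Option String × Option String)
    (m : String × String × String × String) : Option String × Option String :=
  if pvActive gdate m.2.2.1 m.2.2.2 then
    (if m.1 == t1id then some m.2.1 else acc.1,
     if m.1 == t2id then some m.2.1 else acc.2)
  else acc

-- one component of B's update
def pvUpd (gdate tid : String) (acc : Option String) (m : String × String × String × String) : Option String :=
  if pvActive gdate m.2.2.1 m.2.2.2 && (m.1 == tid) then some m.2.1 else acc

lemma find_teams_eq (val : String × String × String) (l : List (String × String × String × String)) :
    find_teams val l =
      ((l.filter (fun x => x.1 == val.2.1)).foldl (pvStepA val.1) none,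
       (l.filter (fun x => x.1 == val.2.2)).foldl (pvStepA val.1) none) := rfl

lemma find_teams_alt_eq (val : String × String × String) (l : List (String × String × String × String)) :
    find_teams_alt val l = l.foldl (pvStepB val.1 val.2.1 val.2.2) (none, none) := rfl

lemma pvStepB_components (g t1 t2 : String) (p : Option String × Option String)
    (m : String × String × String × String) :
    pvStepB g t1 t2 p m = (pvUpd g t1 p.1 m, pvUpd g t2 p.2 m) := by
  by_cases ha : pvActive g m.2.2.1 m.2.2.2 <;> simp [pvStepB, pvUpd, ha]

lemma pvFoldB_components (g t1 t2 : String) (l : List (String × String × String × String))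
    (a b : Option String) :
    l.foldl (pvStepB g t1 t2) (a, b) = (l.foldl (pvUpd g t1) a, l.foldl (pvUpd g t2) b) := by
  induction l generalizing a b with
  | nil => rfl
  | cons x xs ih =>
    rw [List.foldl_cons, List.foldl_cons, List.foldl_cons, pvStepB_components, ih]

lemma pvStepA_eq_active (g : String) (acc : Option String) (m : String × String × String × String) :
    pvStepA g acc m = if pvActive g m.2.2.1 m.2.2.2 then some m.2.1 else acc := by
  by_cases he : m.2.2.2 = ""
  · simp [pvStepA, pvActive, he, ge_iff_le]
  · simp [pvStepA, pvActive, he]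

lemma pvFoldA_filter (g tid : String) (l : List (String × String × String × String))
    (a : Option String) :
    (l.filter (fun x => x.1 == tid)).foldl (pvStepA g) a = l.foldl (pvUpd g tid) a := by
  induction l generalizing a with
  | nil => rfl
  | cons x xs ih =>
    rw [List.filter_cons, List.foldl_cons]
    by_cases h : (x.1 == tid) = true
    · rw [if_pos h, List.foldl_cons, ih, pvStepA_eq_active]
      have : pvUpd g tid a x = if pvActive g x.2.2.1 x.2.2.2 then some x.2.1 else a := by
        simp [pvUpd, h]
      rw [this]
    · rw [if_neg h, ih]
      have : pvUpd g tid a x = a := by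
        simp [pvUpd, h]
      rw [this]

-- ===== VERDICT (by name: the statement is the Claim_ definition above) =====
theorem find_teams_spec : Claim_equal_find_teams := by
  intro val l _
  show find_teams val l = find_teams_alt val l
  rw [find_teams_eq, find_teams_alt_eq, pvFoldB_components, pvFoldA_filter, pvFoldA_filter]
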